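-- pv_equiv track=rewrite | github.com/Masanar/DALGO | DivideAndConquer/CommonProblem/n-digit/solution.py | n_digit
-- ===== SOURCE A (Python) =====
-- def n_digit(depth, previous_digit):
--     digit_count = 0
--     if not depth:
--         return 0
--     if depth == 1:
--         if previous_digit:
--             digit_count = 1
--         else:
--             digit_count = 2
--     elif previous_digit:
--         digit_count = n_digit(depth - 1, 0)
--     elif not previous_digit:
--         digit_count = n_digit(depth - 1, 0) + n_digit(depth - 1, 1)
--     return digit_count
-- ===== SOURCE B (Python) =====
-- def n_digit(depth, previous_digit):
--     # Iterative bottom-up DP: (f0, f1) = counts at current depth for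
--     # previous_digit = 0 and 1; Fibonacci-style update, O(depth) time.
--     if depth <= 0:
--         return 0
--     f0, f1 = 2, 1
--     for _ in range(depth - 1):
--         f0, f1 = f0 + f1, f0
--     return f1 if previous_digit else f0
-- ===== Notes on version B (the rewrite author's own statement) =====
-- stated objective: faster
-- what changed: Replaced the branching recursion with an iterative bottom-up DP carrying the pair (count for previous_digit=0, count for previous_digit=1) per depth, Fibonacci-style; intended as faster (O(depth) vs exponential recursion); a timing run read ~1100x at the largest size both finished but could not confirm beyond it because A timed out.
import Mathlib
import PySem

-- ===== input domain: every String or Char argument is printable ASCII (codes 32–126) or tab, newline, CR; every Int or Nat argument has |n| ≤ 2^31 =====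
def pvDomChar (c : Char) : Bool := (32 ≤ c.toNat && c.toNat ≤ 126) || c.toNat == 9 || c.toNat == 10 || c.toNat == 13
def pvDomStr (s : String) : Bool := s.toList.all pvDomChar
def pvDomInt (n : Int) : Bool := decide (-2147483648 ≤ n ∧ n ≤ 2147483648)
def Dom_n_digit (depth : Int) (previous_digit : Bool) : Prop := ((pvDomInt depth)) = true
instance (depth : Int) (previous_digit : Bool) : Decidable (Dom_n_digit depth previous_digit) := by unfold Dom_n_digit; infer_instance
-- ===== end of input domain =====

-- B replaces A's branching recursion by an iterative Fibonacci-style DP over the depth; intended as faster (timing: B read ~1100x at the largest size both finished, unconfirmed because A timed out above it).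

-- ===== PORT A =====
-- A's recursion, step for step, on the nonnegative depth (Pre_ restricts to 0 ≤ depth,
-- where Python's recursion terminates); branches in A's order.
def n_digitAux : Nat → Bool → Int
  | 0, _ => 0                                   -- if not depth: return 0
  | 1, b => if b then 1 else 2                  -- depth == 1 branch
  | (n+2), b =>
      if b then n_digitAux (n+1) false          -- elif previous_digit
      else n_digitAux (n+1) false + n_digitAux (n+1) true   -- elif not previous_digit

def n_digit (depth : Int) (previous_digit : Bool) : Int :=
  n_digitAux depth.toNat previous_digit

-- ===== PORT B =====
def n_digit_alt (depth : Int) (previous_digit : Bool) : Int :=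
  if depth ≤ 0 then 0
  else
    let p := (List.range (depth - 1).toNat).foldl
      (fun (st : Int × Int) _ => (st.1 + st.2, st.1)) (2, 1)
    if previous_digit then p.2 else p.1

-- ===== PRECONDITION & SPEC =====
-- Pre_ excludes negative depth, on which Python A recurses without bound (RecursionError).
def Pre_n_digit (depth : Int) (previous_digit : Bool) : Prop := 0 ≤ depth
instance (depth : Int) (previous_digit : Bool) : Decidable (Pre_n_digit depth previous_digit) := by unfold Pre_n_digit; infer_instance
def pvWitness_n_digit : Int × Bool := (5, false)

def Spec_n_digit (depth : Int) (previous_digit : Bool) (out : Int) : Prop := out = n_digit_alt depth previous_digit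
instance (depth : Int) (previous_digit : Bool) (out : Int) : Decidable (Spec_n_digit depth previous_digit out) := by unfold Spec_n_digit; infer_instance

-- ===== CLAIM (what is proved, stated in full; the proofs are below) =====
def Claim_equal_n_digit : Prop := ∀ (depth : Int) (previous_digit : Bool), Dom_n_digit depth previous_digit → Pre_n_digit depth previous_digit → Spec_n_digit depth previous_digit (n_digit depth previous_digit)

-- ===== LEMMAS AND PROOFS =====

-- the DP state after n iterations of B's loop
def pvStep (n : Nat) : Int × Int :=
  (List.range n).foldl (fun (st : Int × Int) _ => (st.1 + st.2, st.1)) (2, 1)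

theorem pvStep_succ (n : Nat) :
    pvStep (n + 1) = ((pvStep n).1 + (pvStep n).2, (pvStep n).1) := by
  simp [pvStep, List.range_succ]

theorem n_digitAux_eq_pvStep (n : Nat) :
    n_digitAux (n + 1) false = (pvStep n).1 ∧ n_digitAux (n + 1) true = (pvStep n).2 := by
  induction n with
  | zero => simp [n_digitAux, pvStep]
  | succ k ih =>
    constructor
    · show n_digitAux (k + 2) false = _
      simp [n_digitAux, pvStep_succ, ih.1, ih.2]
    · show n_digitAux (k + 2) true = _
      simp [n_digitAux, pvStep_succ, ih.1]

-- ===== VERDICT (by name: the statement is the Claim_ definition above) =====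
theorem n_digit_spec : Claim_equal_n_digit := by
  intro depth b _ hpre
  unfold Spec_n_digit n_digit n_digit_alt
  rcases eq_or_lt_of_le hpre with h0 | hpos
  · subst h0; cases b <;> simp [n_digitAux]
  · have hnle : ¬ depth ≤ 0 := by omega
    obtain ⟨k, hk⟩ : ∃ k : Nat, depth.toNat = k + 1 := by
      refine ⟨depth.toNat - 1, ?_⟩; omega
    have hk1 : (depth - 1).toNat = k := by omega
    rw [hk, if_neg hnle, hk1]
    have h := n_digitAux_eq_pvStep k
    cases b
    · simpa [pvStep] using h.1
    · simpa [pvStep] using h.2
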